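/- GENERATED by farm/mkstatement.py from design/units.tsv (unit `__asan_register_globals`) and the Specs of Vorbis/Spec/*.lean — do not edit.
   THE STATEMENT of the proof unit `__asan_register_globals`: the function `__asan_register_globals` (28 instructions) satisfies its contract,
   given the contracts of its callees. What the names mean: Vorbis/Spec/Basic.lean. The theorem to prove:
   `theorem asan_register_globals_ok : Vorbis.Spec.asan_register_globals.Statement`. -/
import Vorbis.Spec.Runtime
namespace Vorbis.Spec.asan_register_globals
open X86 X86.User Asan

/-- The statement of unit `__asan_register_globals`. -/
def Statement : Prop :=
  ∀ (Lay : Layout) (_hLay : Lay.hi = 0x1000000) (μ : Microarch) (_hμ : UserX.MicroOK μ) (u₀ : State)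
    (_hcode : HasCodeNat Lay u₀ Vorbis.L.__asan_register_globals.entry Vorbis.Code.code___asan_register_globals.nat Vorbis.L.__asan_register_globals.size),
    Calls Lay μ Vorbis.WayInv (Vorbis.conv u₀) Vorbis.L.__asan_register_globals.entry (Asan.registerGlobalsSpec Vorbis.Spec.rt)

end Vorbis.Spec.asan_register_globals
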